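-- pv_equiv track=rewrite | github.com/amilacjay/isyntax | dbnormalizer/experiments/algorithm-test.py | getDependencyMatrix
-- ===== SOURCE A (Python) =====
-- def getDependencyMatrix(dets, skeys, fds):
--     dm = []
--     for i, d in enumerate(dets):
--         row = []
--         for k in skeys:
--
--             list = [fd[1][0] for fd in fds if fd[0]==d]
--
--             if k in d:
--                 row.append(2)
--             elif k in list:
--                 row.append(1)
--             else:
--                 row.append(0)
--
--         dm.append(row)
--     return dm
-- ===== SOURCE B (Python) =====
-- def getDependencyMatrix(dets, skeys, fds):
--     dset = set(dets)
--     firsts = {}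
--     for fd in fds:
--         if fd[0] in dset and fd[1]:
--             firsts.setdefault(fd[0], set()).add(fd[1][0])
--     return [[2 if k in d else (1 if k in firsts.get(d, ()) else 0) for k in skeys]
--             for d in dets]
-- ===== Notes on version B (the rewrite author's own statement) =====
-- stated objective: faster
-- what changed: B builds a determinant-to-first-RHS-key index (dict of sets, skipping empty RHS lists) in one pass over fds and then fills each cell by an O(1) lookup, instead of A's rebuilding the list of matching-FD first keys from scratch inside every cell of the matrix.
-- crash fix: When skeys is nonempty and some fd whose determinant occurs in dets has an empty RHS list, A raises IndexError on fd[1][0]; B skips such fds and returns the matrix computed from the remaining fds. — e.g. on getDependencyMatrix(["a"], ["k"], [("a", [])]): A raises IndexError, B returns [[0]]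
import Mathlib
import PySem

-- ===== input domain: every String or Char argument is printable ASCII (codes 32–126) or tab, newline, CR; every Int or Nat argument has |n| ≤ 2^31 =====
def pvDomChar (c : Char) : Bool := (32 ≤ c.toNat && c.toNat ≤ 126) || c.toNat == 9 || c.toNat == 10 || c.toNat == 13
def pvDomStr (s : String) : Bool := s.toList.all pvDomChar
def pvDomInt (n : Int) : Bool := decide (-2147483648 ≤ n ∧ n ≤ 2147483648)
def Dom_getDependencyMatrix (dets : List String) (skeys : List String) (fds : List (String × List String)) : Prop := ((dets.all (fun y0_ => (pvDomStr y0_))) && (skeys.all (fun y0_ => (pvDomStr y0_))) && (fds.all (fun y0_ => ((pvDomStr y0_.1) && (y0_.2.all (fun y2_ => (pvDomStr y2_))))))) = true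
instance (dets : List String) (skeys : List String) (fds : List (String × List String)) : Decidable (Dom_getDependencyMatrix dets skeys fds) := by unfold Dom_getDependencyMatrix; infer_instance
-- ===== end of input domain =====

-- B replaces A's per-cell rescan of fds by a determinant→first-RHS-key index built once (one pass over fds,
-- skipping empty RHS lists), then fills the matrix by lookups.  Objective: faster (asymptotic change).

-- ===== PORT A =====
-- literal port of A: per row (over dets, index unused), per key, rebuild the comprehension
-- [fd[1][0] for fd in fds if fd[0]==d] (fd[1][0] ported as pyGetD with default ""; exact under Pre_,
-- since under Pre_ every fd reaching this has nonempty RHS), then the if/elif/else chain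
-- ('k in d' is Python substring test → PySem.Str.isIn).
def getDependencyMatrix (dets : List String) (skeys : List String) (fds : List (String × List String)) : List (List Int) :=
  dets.foldl (fun dm d =>
    dm ++ [skeys.foldl (fun row k =>
      let lst := (fds.filter (fun fd => fd.1 == d)).map (fun fd => PySem.List.pyGetD fd.2 0 "")
      row ++ [if PySem.Str.isIn k d then (2 : Int)
              else if lst.contains k then 1 else 0]) []]) []

-- ===== PORT B =====
-- literal port of Source B: dset = set(dets); one pass over fds building firsts : dict[str, set[str]]
-- ('fd[1]' truthiness = nonempty list; 'setdefault(..).add(x)' ported as insert of (getD ∪ {x}));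
-- then a comprehension of lookups.
def getDependencyMatrix_alt (dets : List String) (skeys : List String) (fds : List (String × List String)) : List (List Int) :=
  let dset : PySem.Set String := PySem.Set.ofList dets
  let firsts : PySem.Dict String (PySem.Set String) :=
    fds.foldl (fun fs fd =>
      if PySem.Set.contains dset fd.1 && !fd.2.isEmpty then
        fs.insert fd.1 (PySem.Set.add (fs.getD fd.1 PySem.Set.empty) (PySem.List.pyGetD fd.2 0 ""))
      else fs) PySem.Dict.empty
  dets.map (fun d => skeys.map (fun k =>
    if PySem.Str.isIn k d then (2 : Int)
    else if PySem.Set.contains (firsts.getD d PySem.Set.empty) k then 1 else 0))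

-- ===== PRECONDITION & SPEC =====
-- Pre_ excludes exactly the inputs on which the Python A raises IndexError on fd[1][0]: skeys nonempty
-- (so the per-cell comprehension runs) together with some fd whose determinant occurs in dets but whose
-- RHS list is empty.
def Pre_getDependencyMatrix (dets : List String) (skeys : List String) (fds : List (String × List String)) : Prop :=
  skeys = [] ∨ ∀ fd ∈ fds, fd.1 ∈ dets → fd.2 ≠ []
instance (dets : List String) (skeys : List String) (fds : List (String × List String)) : Decidable (Pre_getDependencyMatrix dets skeys fds) := by unfold Pre_getDependencyMatrix; infer_instance
def pvWitness_getDependencyMatrix : List String × List String × (List (String × List String)) :=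
  (["a", "bk"], ["k", "a"], [("a", ["k"]), ("c", ["a"])])

-- On exactly these inputs A raises IndexError (fd[1][0] on an empty RHS of an in-dets fd, skeys nonempty);
-- B skips such fds and returns the matrix built from the rest.
def Raises_getDependencyMatrix (dets : List String) (skeys : List String) (fds : List (String × List String)) : Prop :=
  skeys ≠ [] ∧ ∃ fd ∈ fds, fd.1 ∈ dets ∧ fd.2 = []
instance (dets : List String) (skeys : List String) (fds : List (String × List String)) : Decidable (Raises_getDependencyMatrix dets skeys fds) := by unfold Raises_getDependencyMatrix; infer_instance
def pvRaiseWitness_getDependencyMatrix : List String × List String × (List (String × List String)) :=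
  (["a"], ["k"], [("a", [])])
def pvRaiseWitnessOut_getDependencyMatrix : List (List Int) := [[0]]

def Spec_getDependencyMatrix (dets : List String) (skeys : List String) (fds : List (String × List String)) (out : List (List Int)) : Prop := out = getDependencyMatrix_alt dets skeys fds
instance (dets : List String) (skeys : List String) (fds : List (String × List String)) (out : List (List Int)) : Decidable (Spec_getDependencyMatrix dets skeys fds out) := by unfold Spec_getDependencyMatrix; infer_instance

-- ===== CLAIM (what is proved, stated in full; the proofs are below) =====
def Claim_equal_getDependencyMatrix : Prop := ∀ (dets : List String) (skeys : List String) (fds : List (String × List String)), Dom_getDependencyMatrix dets skeys fds → Pre_getDependencyMatrix dets skeys fds → Spec_getDependencyMatrix dets skeys fds (getDependencyMatrix dets skeys fds)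
def Claim_raises_getDependencyMatrix : Prop := (∀ (dets : List String) (skeys : List String) (fds : List (String × List String)), Dom_getDependencyMatrix dets skeys fds → Raises_getDependencyMatrix dets skeys fds → ¬ Pre_getDependencyMatrix dets skeys fds) ∧ (Dom_getDependencyMatrix (pvRaiseWitness_getDependencyMatrix.1) (pvRaiseWitness_getDependencyMatrix.2.1) (pvRaiseWitness_getDependencyMatrix.2.2) ∧ Raises_getDependencyMatrix (pvRaiseWitness_getDependencyMatrix.1) (pvRaiseWitness_getDependencyMatrix.2.1) (pvRaiseWitness_getDependencyMatrix.2.2) ∧ getDependencyMatrix_alt (pvRaiseWitness_getDependencyMatrix.1) (pvRaiseWitness_getDependencyMatrix.2.1) (pvRaiseWitness_getDependencyMatrix.2.2) = pvRaiseWitnessOut_getDependencyMatrix)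

-- ===== LEMMAS AND PROOFS =====

-- a foldl that only appends singletons is a map
theorem pv_foldl_push {α β : Type} (g : α → β) (xs : List α) (init : List β) :
    xs.foldl (fun acc x => acc ++ [g x]) init = init ++ xs.map g := by
  induction xs generalizing init with
  | nil => simp
  | cons x xs ih => simp [List.foldl_cons, ih]

-- membership in the built index: under the nonempty-RHS hypothesis, k is in firsts[d] iff
-- some fd with fd.1 = d contributes its first RHS key
theorem pv_mem_build (dets : List String) (fds : List (String × List String))
    (fs : PySem.Dict String (PySem.Set String)) (d k : String) (hd : d ∈ dets)
    (hpre : ∀ fd ∈ fds, fd.1 ∈ dets → fd.2 ≠ []) :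
    (k ∈ (fds.foldl (fun fs fd =>
        if PySem.Set.contains (PySem.Set.ofList dets) fd.1 && !fd.2.isEmpty then
          fs.insert fd.1 (PySem.Set.add (fs.getD fd.1 PySem.Set.empty) (PySem.List.pyGetD fd.2 0 ""))
        else fs) fs).getD d PySem.Set.empty)
      ↔ (k ∈ fs.getD d PySem.Set.empty
          ∨ k ∈ (fds.filter (fun fd => fd.1 == d)).map (fun fd => PySem.List.pyGetD fd.2 0 "")) := by
  induction fds generalizing fs with
  | nil => simp
  | cons fd fds ih =>
    have hpre' : ∀ f ∈ fds, f.1 ∈ dets → f.2 ≠ [] := fun f hf => hpre f (List.mem_cons_of_mem _ hf)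
    by_cases h1 : fd.1 = d
    · have hne : fd.2 ≠ [] := hpre fd (List.mem_cons_self ..) (h1 ▸ hd)
      have hc : (PySem.Set.contains (PySem.Set.ofList dets) fd.1 && !fd.2.isEmpty) = true := by
        rw [Bool.and_eq_true]
        constructor
        · rw [PySem.Set.contains_iff, PySem.Set.mem_ofList]; exact h1 ▸ hd
        · simpa [List.isEmpty_iff] using hne
      simp only [List.foldl_cons, hc, if_true, ih _ hpre']
      rw [PySem.Dict.getD_insert, if_pos h1.symm]
      simp only [List.filter_cons, h1, beq_self_eq_true, if_true, List.map_cons, List.mem_cons]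
      rw [PySem.Set.mem_add]
      tauto
    · have hfil : (fd.1 == d) = false := beq_eq_false_iff_ne.2 h1
      by_cases hc : (PySem.Set.contains (PySem.Set.ofList dets) fd.1 && !fd.2.isEmpty) = true
      · simp only [List.foldl_cons, hc, if_true, ih _ hpre']
        rw [PySem.Dict.getD_insert, if_neg (Ne.symm h1)]
        simp [hfil]
      · simp only [List.foldl_cons, Bool.not_eq_true] at hc ⊢
        simp only [hc, Bool.false_eq_true, if_false, ih _ hpre']
        simp [hfil]

-- ===== VERDICT (by name: the statement is the Claim_ definition above) =====
theorem getDependencyMatrix_spec : Claim_equal_getDependencyMatrix := by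
  intro dets skeys fds _ hpre
  unfold Spec_getDependencyMatrix getDependencyMatrix getDependencyMatrix_alt
  rw [pv_foldl_push, List.nil_append]
  rcases hpre with h0 | hpre
  · subst h0; simp
  refine List.map_congr_left (fun d hd => ?_)
  rw [pv_foldl_push, List.nil_append]
  refine List.map_congr_left (fun k _ => ?_)
  have hmb := pv_mem_build dets fds PySem.Dict.empty d k hd hpre
  rw [PySem.Dict.getD_empty] at hmb
  have hb : ((fds.filter (fun fd => fd.1 == d)).map (fun fd => PySem.List.pyGetD fd.2 0 "")).contains k
      = PySem.Set.contains
          ((fds.foldl (fun fs fd =>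
              if PySem.Set.contains (PySem.Set.ofList dets) fd.1 && !fd.2.isEmpty then
                fs.insert fd.1 (PySem.Set.add (fs.getD fd.1 PySem.Set.empty) (PySem.List.pyGetD fd.2 0 ""))
              else fs) PySem.Dict.empty).getD d PySem.Set.empty) k := by
    rw [Bool.eq_iff_iff, List.contains_iff_mem, PySem.Set.contains_iff, hmb]
    simp [PySem.Set.empty]
  simp only [hb]

theorem getDependencyMatrix_raises : Claim_raises_getDependencyMatrix := by
  unfold Claim_raises_getDependencyMatrix
  refine ⟨?_, by decide⟩
  rintro dets skeys fds _ ⟨hsk, fd, hfd, hin, hnil⟩ hpre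
  rcases hpre with h0 | hpre
  · exact hsk h0
  · exact hpre fd hfd hin hnil

-- self-check: the raises theorem certifies the stated witness lies in the raise region
theorem pvRaiseWitness_getDependencyMatrix_ok :
    Raises_getDependencyMatrix ["a"] ["k"] [("a", [])] := by
  have h := getDependencyMatrix_raises
  unfold Claim_raises_getDependencyMatrix at h
  exact h.2.2.1
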